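-- pv_equiv track=rewrite | github.com/taeho0888/BOJ | 그래프/퍼즐 조각 채우기 (레벨3).py | is_fit
-- ===== SOURCE A (Python) =====
-- def tilt(square):
--     n, m = len(square), len(square[0])
--     new_square = []
--     for i in range(m):
--         cur_row = []
--         for j in range(n-1, -1, -1):
--             cur_row.append(square[j][i])
--         new_square.append(cur_row)
--
--     return new_square
--
-- def is_fit(blank, block):
--     # 갯수 다르면 맞지 않음
--     if len(blank) != len(block):
--         return False
--
--     # blank를 정사각형 안에 넣기
--     max_x, min_x = max([x[0] for x in blank]), min([x[0] for x in blank])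
--     max_y, min_y = max([x[1] for x in blank]), min([x[1] for x in blank])
--     h, w = max_x - min_x + 1, max_y - min_y + 1
--
--     blank_square = [[0]*w for _ in range(h)]
--     for i, b in enumerate(blank):
--         blank_square[b[0] - min_x][b[1] - min_y] = 1
--
--     # block을 정사각형 안에 넣기
--     max_x, min_x = max([x[0] for x in block]), min([x[0] for x in block])
--     max_y, min_y = max([x[1] for x in block]), min([x[1] for x in block])
--     h, w = max_x - min_x + 1, max_y - min_y + 1
--
--     block_square = [[0]*w for _ in range(h)]
--     for i, b in enumerate(block):
--         block_square[b[0] - min_x][b[1] - min_y] = 1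
--
--     # 4방향 다 돌렸을 때 맞으면 return true
--     for _ in range(4):
--         if blank_square == block_square:
--             return True
--         block_square = tilt(block_square)
--
--     return False
-- ===== SOURCE B (Python) =====
-- def is_fit(blank, block):
--     if len(blank) != len(block):
--         return False
--
--     def norm(pts):
--         mx = min(p[0] for p in pts)
--         my = min(p[1] for p in pts)
--         return frozenset((p[0] - mx, p[1] - my) for p in pts)
--
--     target = norm(blank)
--     cur = norm(block)
--     for _ in range(4):
--         if cur == target:
--             return True
--         cur = norm([(y, -x) for (x, y) in cur])
--     return False
-- ===== Notes on version B (the rewrite author's own statement) =====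
-- stated objective: faster
-- what changed: B replaces A's bounding-box 0/1 grids (built cell-by-cell, rotated by transposing the matrix) with normalized frozensets of coordinates rotated by the map (x,y)->(y,-x) and re-normalized; no 2D grid is ever built.
import Mathlib
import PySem

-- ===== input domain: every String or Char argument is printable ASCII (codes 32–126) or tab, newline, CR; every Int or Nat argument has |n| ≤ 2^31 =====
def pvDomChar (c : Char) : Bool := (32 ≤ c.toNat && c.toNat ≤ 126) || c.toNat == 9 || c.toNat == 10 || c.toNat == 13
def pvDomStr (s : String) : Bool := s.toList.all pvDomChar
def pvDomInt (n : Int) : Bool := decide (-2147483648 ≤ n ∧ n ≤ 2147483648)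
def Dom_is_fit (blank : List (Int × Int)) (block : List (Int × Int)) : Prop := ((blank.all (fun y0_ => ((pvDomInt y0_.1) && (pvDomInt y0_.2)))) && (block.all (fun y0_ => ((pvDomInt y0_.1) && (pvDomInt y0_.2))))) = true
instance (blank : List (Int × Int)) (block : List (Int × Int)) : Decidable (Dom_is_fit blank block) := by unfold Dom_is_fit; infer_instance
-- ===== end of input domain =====

-- B replaces A's bounding-box 0/1 grids with normalized coordinate sets rotated by (x,y)->(y,-x); no grid is built, avoiding the O(area) work (objective: faster).


-- ===== PORT A =====
-- tilt: rotate the matrix (row i of the result reads column i bottom-up)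
def tilt (square : List (List Int)) : List (List Int) :=
  let n := square.length
  let m := (square.headD []).length
  (List.range m).map (fun i => ((List.range n).reverse).map (fun j => ((square.getD j []).getD i 0)))

-- the bounding-box 0/1 grid A builds for a coordinate list (max/min of [] read as 0; inside Pre_ the list is nonempty)
def buildGrid (pts : List (Int × Int)) : List (List Int) :=
  let maxX := (PySem.List.max? (pts.map (fun p => p.1)) (fun y => y)).getD 0
  let minX := (PySem.List.min? (pts.map (fun p => p.1)) (fun y => y)).getD 0
  let maxY := (PySem.List.max? (pts.map (fun p => p.2)) (fun y => y)).getD 0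
  let minY := (PySem.List.min? (pts.map (fun p => p.2)) (fun y => y)).getD 0
  let h := maxX - minX + 1
  let w := maxY - minY + 1
  let g0 := List.replicate h.toNat (List.replicate w.toNat (0 : Int))
  pts.foldl (fun g b =>
    PySem.List.pySetD g (b.1 - minX)
      (PySem.List.pySetD (PySem.List.pyGetD g (b.1 - minX) []) (b.2 - minY) (1 : Int))) g0

def is_fit (blank : List (Int × Int)) (block : List (Int × Int)) : Bool :=
  if blank.length ≠ block.length then false
  else
    let blank_square := buildGrid blank
    let block_square := buildGrid block
    -- 'for _ in range(4): if equal return True; tilt' as a fold with a found-flag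
    ((List.range 4).foldl (fun (st : Bool × List (List Int)) _ =>
        if st.1 then st
        else if blank_square == st.2 then (true, st.2)
        else (st.1, tilt st.2)) (false, block_square)).1

-- ===== PORT B =====
-- normalized coordinate set: subtract the min on each axis, collect distinct points
def normSet (pts : List (Int × Int)) : PySem.Set (Int × Int) :=
  let mx := (PySem.List.min? (pts.map (fun p => p.1)) (fun y => y)).getD 0
  let my := (PySem.List.min? (pts.map (fun p => p.2)) (fun y => y)).getD 0
  PySem.Set.ofList (pts.map (fun p => (p.1 - mx, p.2 - my)))

def is_fit_alt (blank : List (Int × Int)) (block : List (Int × Int)) : Bool :=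
  if blank.length ≠ block.length then false
  else
    let target := normSet blank
    ((List.range 4).foldl (fun (st : Bool × PySem.Set (Int × Int)) _ =>
        if st.1 then st
        else if PySem.Set.equal st.2 target then (true, st.2)
        else (st.1, normSet (st.2.map (fun p => (p.2, -p.1))))) (false, normSet block)).1

-- ===== PRECONDITION & SPEC =====
-- Pre_ excludes only the input on which A raises: both lists empty (equal lengths, then max([]) raises ValueError; B's min() raises there too).
def Pre_is_fit (blank : List (Int × Int)) (block : List (Int × Int)) : Prop :=
  ¬ (blank = [] ∧ block = [])
instance (blank : List (Int × Int)) (block : List (Int × Int)) : Decidable (Pre_is_fit blank block) := by unfold Pre_is_fit; infer_instance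

def pvWitness_is_fit : (List (Int × Int)) × (List (Int × Int)) := ([(0, 0), (0, 1)], [(3, 5), (4, 5)])

def Spec_is_fit (blank : List (Int × Int)) (block : List (Int × Int)) (out : Bool) : Prop := out = is_fit_alt blank block
instance (blank : List (Int × Int)) (block : List (Int × Int)) (out : Bool) : Decidable (Spec_is_fit blank block out) := by unfold Spec_is_fit; infer_instance

-- ===== CLAIM (what is proved, stated in full; the proofs are below) =====
def Claim_equal_is_fit : Prop := ∀ (blank : List (Int × Int)) (block : List (Int × Int)), Dom_is_fit blank block → Pre_is_fit blank block → Spec_is_fit blank block (is_fit blank block)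

-- ===== LEMMAS AND PROOFS =====

-- proof-side helper definitions
def maxXof (s : List (Int × Int)) : Int := (s.map (fun p => p.1)).foldl max 0
def maxYof (s : List (Int × Int)) : Int := (s.map (fun p => p.2)).foldl max 0

-- the canonical grid of a normalized point set
def gridOf (s : List (Int × Int)) : List (List Int) :=
  (List.range (maxXof s + 1).toNat).map (fun (i : Nat) =>
    (List.range (maxYof s + 1).toNat).map (fun (j : Nat) =>
      if ((i : Int), (j : Int)) ∈ s then (1 : Int) else 0))

-- a normalized point set: nonneg coordinates, both minima attained at 0
def Good (s : List (Int × Int)) : Prop :=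
  (∀ q ∈ s, 0 ≤ q.1 ∧ 0 ≤ q.2) ∧ (∃ q ∈ s, q.1 = 0) ∧ (∃ q ∈ s, q.2 = 0)

def minXval (pts : List (Int × Int)) : Int := (PySem.List.min? (pts.map (fun p => p.1)) (fun y => y)).getD 0
def minYval (pts : List (Int × Int)) : Int := (PySem.List.min? (pts.map (fun p => p.2)) (fun y => y)).getD 0
def maxXval (pts : List (Int × Int)) : Int := (PySem.List.max? (pts.map (fun p => p.1)) (fun y => y)).getD 0
def maxYval (pts : List (Int × Int)) : Int := (PySem.List.max? (pts.map (fun p => p.2)) (fun y => y)).getD 0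

def updOne (mx my : Int) (g : List (List Int)) (b : Int × Int) : List (List Int) :=
  PySem.List.pySetD g (b.1 - mx)
    (PySem.List.pySetD (PySem.List.pyGetD g (b.1 - mx) []) (b.2 - my) (1 : Int))

theorem buildGrid_def (pts : List (Int × Int)) :
    buildGrid pts = pts.foldl (updOne (minXval pts) (minYval pts))
      (List.replicate (maxXval pts - minXval pts + 1).toNat
        (List.replicate (maxYval pts - minYval pts + 1).toNat (0 : Int))) := rfl

theorem normSet_def (pts : List (Int × Int)) :
    normSet pts = PySem.Set.ofList (pts.map (fun p => (p.1 - minXval pts, p.2 - minYval pts))) := rfl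

-- ---- foldl max facts ----
theorem foldlMax_le {l : List Int} {B : Int} (hub : ∀ x ∈ l, x ≤ B) (hB0 : 0 ≤ B) :
    l.foldl max 0 ≤ B := by
  rcases PySem.List.foldl_max_mem l 0 with h | h
  · rw [h]; exact hB0
  · exact hub _ h

theorem foldlMax_eq {l : List Int} {B : Int} (hB : B ∈ l) (hub : ∀ x ∈ l, x ≤ B) (hB0 : 0 ≤ B) :
    l.foldl max 0 = B :=
  le_antisymm (foldlMax_le hub hB0) ((PySem.List.le_foldl_max l 0).2 B hB)

theorem foldlMax_congr {l l' : List Int} (hm : ∀ x, x ∈ l ↔ x ∈ l') :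
    l.foldl max 0 = l'.foldl max 0 := by
  have half : ∀ (a b : List Int), (∀ x, x ∈ a ↔ x ∈ b) → a.foldl max 0 ≤ b.foldl max 0 := by
    intro a b hab
    rcases PySem.List.foldl_max_mem a 0 with h | h
    · rw [h]; exact (PySem.List.le_foldl_max b 0).1
    · exact (PySem.List.le_foldl_max b 0).2 _ ((hab _).1 h)
  exact le_antisymm (half _ _ hm) (half _ _ fun x => (hm x).symm)

theorem maxXof_nonneg (s : List (Int × Int)) : 0 ≤ maxXof s := (PySem.List.le_foldl_max _ 0).1
theorem maxYof_nonneg (s : List (Int × Int)) : 0 ≤ maxYof s := (PySem.List.le_foldl_max _ 0).1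

theorem le_maxXof {s : List (Int × Int)} {q : Int × Int} (h : q ∈ s) : q.1 ≤ maxXof s :=
  (PySem.List.le_foldl_max _ 0).2 _ (List.mem_map_of_mem h)
theorem le_maxYof {s : List (Int × Int)} {q : Int × Int} (h : q ∈ s) : q.2 ≤ maxYof s :=
  (PySem.List.le_foldl_max _ 0).2 _ (List.mem_map_of_mem h)

theorem maxXof_attained {s : List (Int × Int)} (h0 : ∃ q ∈ s, q.1 = 0) :
    ∃ q ∈ s, q.1 = maxXof s := by
  rcases PySem.List.foldl_max_mem (s.map (fun p => p.1)) 0 with h | h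
  · obtain ⟨q, hq, hq0⟩ := h0
    exact ⟨q, hq, by rw [maxXof, h, hq0]⟩
  · rcases List.mem_map.1 h with ⟨q, hq, he⟩
    exact ⟨q, hq, by rw [maxXof]; exact he⟩

-- ---- min?/max? facts for nonempty lists ----
theorem minXval_le {pts : List (Int × Int)} {p : Int × Int} (hne : pts ≠ []) (hp : p ∈ pts) :
    minXval pts ≤ p.1 := by
  cases h : PySem.List.min? (pts.map (fun p => p.1)) (fun y => y) with
  | none => exact absurd (by simpa using (PySem.List.min?_eq_none_iff _ _).1 h) hne
  | some m => simpa [minXval, h] using PySem.List.min?_isMin h _ (List.mem_map_of_mem hp)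
theorem minYval_le {pts : List (Int × Int)} {p : Int × Int} (hne : pts ≠ []) (hp : p ∈ pts) :
    minYval pts ≤ p.2 := by
  cases h : PySem.List.min? (pts.map (fun p => p.2)) (fun y => y) with
  | none => exact absurd (by simpa using (PySem.List.min?_eq_none_iff _ _).1 h) hne
  | some m => simpa [minYval, h] using PySem.List.min?_isMin h _ (List.mem_map_of_mem hp)
theorem le_maxXval {pts : List (Int × Int)} {p : Int × Int} (hne : pts ≠ []) (hp : p ∈ pts) :
    p.1 ≤ maxXval pts := by
  cases h : PySem.List.max? (pts.map (fun p => p.1)) (fun y => y) with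
  | none => exact absurd (by simpa using (PySem.List.max?_eq_none_iff _ _).1 h) hne
  | some m => simpa [maxXval, h] using PySem.List.max?_isMax h _ (List.mem_map_of_mem hp)
theorem le_maxYval {pts : List (Int × Int)} {p : Int × Int} (hne : pts ≠ []) (hp : p ∈ pts) :
    p.2 ≤ maxYval pts := by
  cases h : PySem.List.max? (pts.map (fun p => p.2)) (fun y => y) with
  | none => exact absurd (by simpa using (PySem.List.max?_eq_none_iff _ _).1 h) hne
  | some m => simpa [maxYval, h] using PySem.List.max?_isMax h _ (List.mem_map_of_mem hp)
theorem minXval_attained {pts : List (Int × Int)} (hne : pts ≠ []) : ∃ p ∈ pts, p.1 = minXval pts := by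
  cases h : PySem.List.min? (pts.map (fun p => p.1)) (fun y => y) with
  | none => exact absurd (by simpa using (PySem.List.min?_eq_none_iff _ _).1 h) hne
  | some m =>
    obtain ⟨p, hp, he⟩ := List.mem_map.1 (PySem.List.min?_mem h)
    exact ⟨p, hp, by simp [minXval, h, he]⟩
theorem minYval_attained {pts : List (Int × Int)} (hne : pts ≠ []) : ∃ p ∈ pts, p.2 = minYval pts := by
  cases h : PySem.List.min? (pts.map (fun p => p.2)) (fun y => y) with
  | none => exact absurd (by simpa using (PySem.List.min?_eq_none_iff _ _).1 h) hne
  | some m =>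
    obtain ⟨p, hp, he⟩ := List.mem_map.1 (PySem.List.min?_mem h)
    exact ⟨p, hp, by simp [minYval, h, he]⟩
theorem maxXval_attained {pts : List (Int × Int)} (hne : pts ≠ []) : ∃ p ∈ pts, p.1 = maxXval pts := by
  cases h : PySem.List.max? (pts.map (fun p => p.1)) (fun y => y) with
  | none => exact absurd (by simpa using (PySem.List.max?_eq_none_iff _ _).1 h) hne
  | some m =>
    obtain ⟨p, hp, he⟩ := List.mem_map.1 (PySem.List.max?_mem h)
    exact ⟨p, hp, by simp [maxXval, h, he]⟩
theorem maxYval_attained {pts : List (Int × Int)} (hne : pts ≠ []) : ∃ p ∈ pts, p.2 = maxYval pts := by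
  cases h : PySem.List.max? (pts.map (fun p => p.2)) (fun y => y) with
  | none => exact absurd (by simpa using (PySem.List.max?_eq_none_iff _ _).1 h) hne
  | some m =>
    obtain ⟨p, hp, he⟩ := List.mem_map.1 (PySem.List.max?_mem h)
    exact ⟨p, hp, by simp [maxYval, h, he]⟩

theorem mem_normSet {pts : List (Int × Int)} {q : Int × Int} :
    q ∈ normSet pts ↔ ∃ p ∈ pts, q = (p.1 - minXval pts, p.2 - minYval pts) := by
  rw [normSet_def, PySem.Set.mem_ofList, List.mem_map]
  constructor
  · rintro ⟨p, hp, rfl⟩; exact ⟨p, hp, rfl⟩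
  · rintro ⟨p, hp, rfl⟩; exact ⟨p, hp, rfl⟩

theorem normSet_good {pts : List (Int × Int)} (hne : pts ≠ []) : Good (normSet pts) := by
  refine ⟨?_, ?_, ?_⟩
  · intro q hq
    obtain ⟨p, hp, rfl⟩ := mem_normSet.1 hq
    exact ⟨by have := minXval_le hne hp; omega, by have := minYval_le hne hp; omega⟩
  · obtain ⟨p, hp, hpx⟩ := minXval_attained hne
    exact ⟨_, mem_normSet.2 ⟨p, hp, rfl⟩, by simp [hpx]⟩
  · obtain ⟨p, hp, hpy⟩ := minYval_attained hne
    exact ⟨_, mem_normSet.2 ⟨p, hp, rfl⟩, by simp [hpy]⟩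

-- ---- grids determine exactly the membership ----
theorem gridOf_entry (s : List (Int × Int)) (i j : Nat)
    (hi : i < (maxXof s + 1).toNat) (hj : j < (maxYof s + 1).toNat) :
    (((gridOf s).getD i []).getD j 0) = if ((i : Int), (j : Int)) ∈ s then (1 : Int) else 0 := by
  unfold gridOf
  simp only [List.getD_eq_getElem?_getD]
  rw [List.getElem?_map, List.getElem?_range hi]
  simp only [Option.map_some, Option.getD_some]
  rw [List.getElem?_map, List.getElem?_range hj]
  simp only [Option.map_some, Option.getD_some]

theorem gridOf_length (s : List (Int × Int)) : (gridOf s).length = (maxXof s + 1).toNat := by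
  simp [gridOf]

theorem gridOf_getElem (s : List (Int × Int)) (i : Nat) (hi : i < (gridOf s).length) :
    (gridOf s)[i] = (List.range (maxYof s + 1).toNat).map (fun (j : Nat) =>
      if ((i : Int), (j : Int)) ∈ s then (1 : Int) else 0) := by
  unfold gridOf at hi ⊢
  rw [List.getElem_map]
  congr 1
  rw [List.getElem_range]

theorem gridOf_congr {s t : List (Int × Int)} (hm : ∀ q, q ∈ s ↔ q ∈ t) :
    gridOf s = gridOf t := by
  have hmapx : ∀ x, x ∈ s.map (fun p => p.1) ↔ x ∈ t.map (fun p => p.1) := by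
    intro x; simp only [List.mem_map]
    constructor
    · rintro ⟨q, hq, rfl⟩; exact ⟨q, (hm q).1 hq, rfl⟩
    · rintro ⟨q, hq, rfl⟩; exact ⟨q, (hm q).2 hq, rfl⟩
  have hmapy : ∀ x, x ∈ s.map (fun p => p.2) ↔ x ∈ t.map (fun p => p.2) := by
    intro x; simp only [List.mem_map]
    constructor
    · rintro ⟨q, hq, rfl⟩; exact ⟨q, (hm q).1 hq, rfl⟩
    · rintro ⟨q, hq, rfl⟩; exact ⟨q, (hm q).2 hq, rfl⟩
  have hx : maxXof s = maxXof t := foldlMax_congr hmapx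
  have hy : maxYof s = maxYof t := foldlMax_congr hmapy
  unfold gridOf
  rw [hx, hy]
  refine List.map_congr_left fun i _ => ?_
  refine List.map_congr_left fun j _ => ?_
  by_cases hmem : ((i : Int), (j : Int)) ∈ s
  · rw [if_pos hmem, if_pos ((hm _).1 hmem)]
  · rw [if_neg hmem, if_neg fun hc => hmem ((hm _).2 hc)]

theorem mem_of_gridOf_eq {s t : List (Int × Int)}
    (hs : ∀ q ∈ s, 0 ≤ q.1 ∧ 0 ≤ q.2) (ht : ∀ q ∈ t, 0 ≤ q.1 ∧ 0 ≤ q.2)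
    (h : gridOf s = gridOf t) : ∀ q, q ∈ s ↔ q ∈ t := by
  have hlen := congrArg List.length h
  rw [gridOf_length, gridOf_length] at hlen
  have hxs := maxXof_nonneg s
  have hxt := maxXof_nonneg t
  have hx : maxXof s = maxXof t := by omega
  have h0s : 0 < (maxXof s + 1).toNat := by omega
  have hrow := congrArg (fun l => (List.getD l 0 []).length) h
  simp only [gridOf, List.getD_eq_getElem?_getD] at hrow
  rw [List.getElem?_map, List.getElem?_range h0s, List.getElem?_map, List.getElem?_range (hx ▸ h0s)] at hrow
  simp only [Option.map_some, Option.getD_some, List.length_map, List.length_range] at hrow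
  have hy : maxYof s = maxYof t := by
    have hys := maxYof_nonneg s
    have hyt := maxYof_nonneg t
    omega
  have dir : ∀ (a b : List (Int × Int)), (∀ r ∈ a, 0 ≤ r.1 ∧ 0 ≤ r.2) →
      gridOf a = gridOf b → maxXof a = maxXof b → maxYof a = maxYof b → ∀ q ∈ a, q ∈ b := by
    intro a b ha hab hxab hyab q hq
    have h1 := ha q hq
    have h2 : q.1 ≤ maxXof a := le_maxXof hq
    have h3 : q.2 ≤ maxYof a := le_maxYof hq
    have hi : q.1.toNat < (maxXof a + 1).toNat := by omega
    have hj : q.2.toNat < (maxYof a + 1).toNat := by omega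
    have e1 := gridOf_entry a q.1.toNat q.2.toNat hi hj
    have e2 := gridOf_entry b q.1.toNat q.2.toNat (by rw [← hxab]; exact hi) (by rw [← hyab]; exact hj)
    have hqe : ((q.1.toNat : Int), (q.2.toNat : Int)) = q := by
      obtain ⟨x, y⟩ := q
      simp only [Prod.mk.injEq]
      constructor <;> omega
    rw [hqe] at e1 e2
    rw [hab, e2] at e1
    by_cases hb : q ∈ b
    · exact hb
    · rw [if_neg hb, if_pos hq] at e1
      exact absurd e1 (by norm_num)
  exact fun q => ⟨fun hq => dir s t hs h hx hy q hq, fun hq => dir t s ht h.symm hx.symm hy.symm q hq⟩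

-- ---- grid entry characterization of the A-side fold ----
theorem updOne_entry (mx my : Int) (w : Nat) (g : List (List Int)) (b : Int × Int)
    (hrow : ∀ r ∈ g, r.length = w)
    (hb : 0 ≤ b.1 - mx ∧ (b.1 - mx).toNat < g.length ∧ 0 ≤ b.2 - my ∧ (b.2 - my).toNat < w) :
    (updOne mx my g b).length = g.length ∧ (∀ r ∈ updOne mx my g b, r.length = w) ∧
    ∀ i j : Nat, ((updOne mx my g b).getD i []).getD j 0 =
      if (b.1 - mx).toNat = i ∧ (b.2 - my).toNat = j then 1 else (g.getD i []).getD j 0 := by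
  obtain ⟨hb1, hb2, hb3, hb4⟩ := hb
  have hlt : b.1 - mx < (g.length : Int) := by omega
  have hup : updOne mx my g b
      = g.set (b.1 - mx).toNat ((g[(b.1 - mx).toNat]'hb2).set (b.2 - my).toNat 1) := by
    unfold updOne
    rw [PySem.List.pyGetD_eq_getElem g [] hb1 hlt, PySem.List.pySetD_of_nonneg _ _ hb3,
        PySem.List.pySetD_of_nonneg _ _ hb1]
  have hrowlen : (g[(b.1 - mx).toNat]'hb2).length = w := hrow _ (List.getElem_mem hb2)
  refine ⟨by rw [hup, List.length_set], ?_, ?_⟩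
  · intro r hr
    rw [hup] at hr
    rcases List.mem_or_eq_of_mem_set hr with h | h
    · exact hrow _ h
    · rw [h, List.length_set]; exact hrowlen
  · intro i j
    rw [hup]
    simp only [List.getD_eq_getElem?_getD]
    by_cases hia : (b.1 - mx).toNat = i
    · subst hia
      rw [List.getElem?_set_self hb2, Option.getD_some]
      by_cases hjc : (b.2 - my).toNat = j
      · subst hjc
        rw [List.getElem?_set_self (by rw [hrowlen]; exact hb4), Option.getD_some,
            if_pos ⟨rfl, rfl⟩]
      · rw [List.getElem?_set_ne hjc, if_neg (fun hc => hjc hc.2),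
            List.getElem?_eq_getElem hb2, Option.getD_some]
    · rw [List.getElem?_set_ne hia, if_neg (fun hc => hia hc.1)]

theorem fold_entry (mx my : Int) (w : Nat) :
    ∀ (pts : List (Int × Int)) (g : List (List Int)),
    (∀ r ∈ g, r.length = w) →
    (∀ p ∈ pts, 0 ≤ p.1 - mx ∧ (p.1 - mx).toNat < g.length ∧ 0 ≤ p.2 - my ∧ (p.2 - my).toNat < w) →
    (pts.foldl (updOne mx my) g).length = g.length ∧
    (∀ r ∈ pts.foldl (updOne mx my) g, r.length = w) ∧
    ∀ i j : Nat,
      ((pts.foldl (updOne mx my) g).getD i []).getD j 0 =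
      if (∃ p ∈ pts, (p.1 - mx).toNat = i ∧ (p.2 - my).toNat = j) then 1 else (g.getD i []).getD j 0 := by
  intro pts
  induction pts with
  | nil =>
    intro g hrow _
    exact ⟨rfl, hrow, fun i j => by simp⟩
  | cons b rest ih =>
    intro g hrow hin
    obtain ⟨u1, u2, u3⟩ := updOne_entry mx my w g b hrow (hin b List.mem_cons_self)
    obtain ⟨l1, l2, l3⟩ := ih (updOne mx my g b) u2
      (fun p hp => by
        have := hin p (List.mem_cons_of_mem _ hp)
        rw [u1]
        exact this)
    refine ⟨by rw [List.foldl_cons, l1, u1], by rw [List.foldl_cons]; exact l2, ?_⟩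
    intro i j
    rw [List.foldl_cons, l3 i j, u3 i j]
    by_cases h1 : ∃ p ∈ rest, (p.1 - mx).toNat = i ∧ (p.2 - my).toNat = j
    · obtain ⟨p, hp, hc⟩ := h1
      rw [if_pos ⟨p, hp, hc⟩, if_pos ⟨p, List.mem_cons_of_mem _ hp, hc⟩]
    · rw [if_neg h1]
      by_cases h2 : (b.1 - mx).toNat = i ∧ (b.2 - my).toNat = j
      · rw [if_pos h2, if_pos ⟨b, List.mem_cons_self, h2⟩]
      · rw [if_neg h2, if_neg ?_]
        rintro ⟨p, hp, hc⟩
        rcases List.mem_cons.1 hp with rfl | hp'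
        · exact h2 hc
        · exact h1 ⟨p, hp', hc⟩

theorem buildGrid_eq_gridOf {pts : List (Int × Int)} (hne : pts ≠ []) :
    buildGrid pts = gridOf (normSet pts) := by
  obtain ⟨p0, hp0⟩ : ∃ p, p ∈ pts := by
    cases pts with
    | nil => simp at hne
    | cons a t => exact ⟨a, List.mem_cons_self⟩
  have hxx : minXval pts ≤ maxXval pts := le_trans (minXval_le hne hp0) (le_maxXval hne hp0)
  have hyy : minYval pts ≤ maxYval pts := le_trans (minYval_le hne hp0) (le_maxYval hne hp0)
  have hg0len : (List.replicate (maxXval pts - minXval pts + 1).toNat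
      (List.replicate (maxYval pts - minYval pts + 1).toNat (0 : Int))).length
      = (maxXval pts - minXval pts + 1).toNat := List.length_replicate
  have hrow0 : ∀ r ∈ List.replicate (maxXval pts - minXval pts + 1).toNat
      (List.replicate (maxYval pts - minYval pts + 1).toNat (0 : Int)),
      r.length = (maxYval pts - minYval pts + 1).toNat := by
    intro r hr
    rw [List.eq_of_mem_replicate hr, List.length_replicate]
  have hin : ∀ p ∈ pts, 0 ≤ p.1 - minXval pts ∧
      (p.1 - minXval pts).toNat < (List.replicate (maxXval pts - minXval pts + 1).toNat
        (List.replicate (maxYval pts - minYval pts + 1).toNat (0 : Int))).length ∧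
      0 ≤ p.2 - minYval pts ∧ (p.2 - minYval pts).toNat < (maxYval pts - minYval pts + 1).toNat := by
    intro p hp
    have h1 := minXval_le hne hp
    have h2 := le_maxXval hne hp
    have h3 := minYval_le hne hp
    have h4 := le_maxYval hne hp
    rw [hg0len]
    exact ⟨by omega, by omega, by omega, by omega⟩
  obtain ⟨k1, k2, k3⟩ := fold_entry (minXval pts) (minYval pts)
    ((maxYval pts - minYval pts + 1).toNat) pts
    (List.replicate (maxXval pts - minXval pts + 1).toNat
      (List.replicate (maxYval pts - minYval pts + 1).toNat (0 : Int))) hrow0 hin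
  have hMxN : maxXof (normSet pts) = maxXval pts - minXval pts := by
    apply foldlMax_eq
    · obtain ⟨p, hp, hpe⟩ := maxXval_attained hne
      have hmem : (p.1 - minXval pts, p.2 - minYval pts) ∈ normSet pts :=
        mem_normSet.2 ⟨p, hp, rfl⟩
      have := List.mem_map_of_mem hmem (f := fun q => q.1)
      simpa [hpe] using this
    · intro x hx
      obtain ⟨q, hq, rfl⟩ := List.mem_map.1 hx
      obtain ⟨p, hp, rfl⟩ := mem_normSet.1 hq
      have := le_maxXval hne hp
      simp only
      omega
    · omega
  have hMyN : maxYof (normSet pts) = maxYval pts - minYval pts := by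
    apply foldlMax_eq
    · obtain ⟨p, hp, hpe⟩ := maxYval_attained hne
      have hmem : (p.1 - minXval pts, p.2 - minYval pts) ∈ normSet pts :=
        mem_normSet.2 ⟨p, hp, rfl⟩
      have := List.mem_map_of_mem hmem (f := fun q => q.2)
      simpa [hpe] using this
    · intro x hx
      obtain ⟨q, hq, rfl⟩ := List.mem_map.1 hx
      obtain ⟨p, hp, rfl⟩ := mem_normSet.1 hq
      have := le_maxYval hne hp
      simp only
      omega
    · omega
  rw [buildGrid_def]
  apply List.ext_getElem
  · rw [k1, hg0len, gridOf_length, hMxN]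
  · intro i hi1 hi2
    have hiH : i < (maxXval pts - minXval pts + 1).toNat := by rw [k1, hg0len] at hi1; exact hi1
    apply List.ext_getElem
    · rw [k2 _ (List.getElem_mem hi1), gridOf_getElem _ i hi2, List.length_map,
          List.length_range, hMyN]
    · intro j hj1 hj2
      have hjW : j < (maxYval pts - minYval pts + 1).toNat := by
        rw [k2 _ (List.getElem_mem hi1)] at hj1; exact hj1
      have hiN : i < (maxXof (normSet pts) + 1).toNat := by rw [hMxN]; exact hiH
      have hjN : j < (maxYof (normSet pts) + 1).toNat := by rw [hMyN]; exact hjW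
      have lhsE : (pts.foldl (updOne (minXval pts) (minYval pts))
            (List.replicate (maxXval pts - minXval pts + 1).toNat
              (List.replicate (maxYval pts - minYval pts + 1).toNat (0 : Int))))[i][j]'hj1
          = ((pts.foldl (updOne (minXval pts) (minYval pts))
            (List.replicate (maxXval pts - minXval pts + 1).toNat
              (List.replicate (maxYval pts - minYval pts + 1).toNat (0 : Int)))).getD i []).getD j 0 := by
        rw [List.getD_eq_getElem _ [] hi1, List.getD_eq_getElem _ 0 hj1]
      have rhsE : (gridOf (normSet pts))[i][j]'hj2
          = ((gridOf (normSet pts)).getD i []).getD j 0 := by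
        rw [List.getD_eq_getElem _ [] hi2, List.getD_eq_getElem _ 0 hj2]
      rw [lhsE, rhsE, k3 i j, gridOf_entry _ i j hiN hjN]
      have hg0e : ((List.replicate (maxXval pts - minXval pts + 1).toNat
          (List.replicate (maxYval pts - minYval pts + 1).toNat (0 : Int))).getD i []).getD j 0
          = (0 : Int) := by
        rw [List.getD_replicate _ hiH, List.getD_replicate _ hjW]
      rw [hg0e]
      by_cases hc : ((i : Int), (j : Int)) ∈ normSet pts
      · obtain ⟨p, hp, he⟩ := mem_normSet.1 hc
        rw [Prod.mk.injEq] at he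
        have h1 := minXval_le hne hp
        have h3 := minYval_le hne hp
        rw [if_pos hc, if_pos ⟨p, hp, by omega, by omega⟩]
      · rw [if_neg hc, if_neg ?_]
        rintro ⟨p, hp, hc1, hc2⟩
        apply hc
        refine mem_normSet.2 ⟨p, hp, ?_⟩
        have h1 := minXval_le hne hp
        have h3 := minYval_le hne hp
        rw [Prod.mk.injEq]
        constructor <;> omega

theorem beq_grid_eq_equal {s t : List (Int × Int)} (hGs : Good s) (hGt : Good t) :
    ((gridOf t == gridOf s) : Bool) = PySem.Set.equal s t := by
  by_cases h : ∀ x : Int × Int, x ∈ s ↔ x ∈ t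
  · have h1 : gridOf t = gridOf s := gridOf_congr fun q => (h q).symm
    rw [(PySem.Set.equal_iff _ _).2 h]
    exact beq_iff_eq.2 h1
  · have h1 : gridOf t ≠ gridOf s := fun he => h (mem_of_gridOf_eq hGs.1 hGt.1 he.symm)
    have h2 : PySem.Set.equal s t ≠ true := fun he => h ((PySem.Set.equal_iff _ _).1 he)
    simp [h1, h2]

-- ---- rotation ----
theorem mem_stepB {s : List (Int × Int)} (hG : Good s) {q : Int × Int} :
    q ∈ normSet (s.map (fun p => (p.2, -p.1))) ↔ ∃ p ∈ s, q = (p.2, maxXof s - p.1) := by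
  have hne : s ≠ [] := by
    obtain ⟨p, hp, _⟩ := hG.2.1
    intro h; rw [h] at hp; simp at hp
  have hne' : s.map (fun p => (p.2, -p.1)) ≠ [] := by simpa
  have hm1 : minXval (s.map (fun p => (p.2, -p.1))) = 0 := by
    apply le_antisymm
    · obtain ⟨p, hp, hp2⟩ := hG.2.2
      have := minXval_le hne' (List.mem_map_of_mem hp (f := fun p => (p.2, -p.1)))
      simpa [hp2] using this
    · obtain ⟨r, hr, hre⟩ := minXval_attained hne'
      obtain ⟨p, hp, rfl⟩ := List.mem_map.1 hr
      rw [← hre]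
      exact (hG.1 p hp).2
  have hm2 : minYval (s.map (fun p => (p.2, -p.1))) = -(maxXof s) := by
    apply le_antisymm
    · obtain ⟨p, hp, hp1⟩ := maxXof_attained hG.2.1
      have := minYval_le hne' (List.mem_map_of_mem hp (f := fun p => (p.2, -p.1)))
      simp only at this
      omega
    · obtain ⟨r, hr, hre⟩ := minYval_attained hne'
      obtain ⟨p, hp, rfl⟩ := List.mem_map.1 hr
      rw [← hre]
      have := le_maxXof hp
      simp only
      omega
  rw [mem_normSet, hm1, hm2]
  constructor
  · rintro ⟨r, hr, rfl⟩
    obtain ⟨p, hp, rfl⟩ := List.mem_map.1 hr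
    exact ⟨p, hp, by simp only [Prod.mk.injEq]; constructor <;> ring_nf⟩
  · rintro ⟨p, hp, rfl⟩
    exact ⟨(p.2, -p.1), List.mem_map_of_mem hp (f := fun p => (p.2, -p.1)),
      by simp only [Prod.mk.injEq]; constructor <;> ring_nf⟩

theorem good_stepB {s : List (Int × Int)} (hG : Good s) :
    Good (normSet (s.map (fun p => (p.2, -p.1)))) := by
  refine ⟨?_, ?_, ?_⟩
  · intro q hq
    obtain ⟨p, hp, rfl⟩ := (mem_stepB hG).1 hq
    exact ⟨(hG.1 p hp).2, by have := le_maxXof hp; omega⟩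
  · obtain ⟨p, hp, hp2⟩ := hG.2.2
    exact ⟨(p.2, maxXof s - p.1), (mem_stepB hG).2 ⟨p, hp, rfl⟩, hp2⟩
  · obtain ⟨p, hp, hp1⟩ := maxXof_attained hG.2.1
    exact ⟨(p.2, maxXof s - p.1), (mem_stepB hG).2 ⟨p, hp, rfl⟩, by simp [hp1]⟩

theorem tilt_gridOf {s : List (Int × Int)} (hG : Good s) :
    tilt (gridOf s) = gridOf (s.map (fun p => (p.2, maxXof s - p.1))) := by
  have hM0 := maxXof_nonneg s
  have hN0 := maxYof_nonneg s
  have hlen : (gridOf s).length = (maxXof s + 1).toNat := gridOf_length s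
  have h0 : 0 < (gridOf s).length := by omega
  have hhead : (gridOf s).headD [] = (gridOf s)[0]'h0 := by
    simp [List.head?_eq_getElem?, List.getElem?_eq_getElem h0]
  have hheadlen : ((gridOf s).headD []).length = (maxYof s + 1).toNat := by
    rw [hhead, gridOf_getElem s 0 h0, List.length_map, List.length_range]
  have hmapfst : (s.map (fun p => (p.2, maxXof s - p.1))).map (fun q => q.1)
      = s.map (fun p => p.2) := by
    rw [List.map_map]; rfl
  have hX' : maxXof (s.map (fun p => (p.2, maxXof s - p.1))) = maxYof s := by
    rw [maxXof, hmapfst]; rfl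
  have hY' : maxYof (s.map (fun p => (p.2, maxXof s - p.1))) = maxXof s := by
    apply foldlMax_eq
    · obtain ⟨p, hp, hp1⟩ := hG.2.1
      have hmem := List.mem_map_of_mem (List.mem_map_of_mem hp
        (f := fun p => (p.2, maxXof s - p.1))) (f := fun q => q.2)
      simpa [hp1] using hmem
    · intro x hx
      obtain ⟨q, hq, rfl⟩ := List.mem_map.1 hx
      obtain ⟨p, hp, rfl⟩ := List.mem_map.1 hq
      have := (hG.1 p hp).1
      simp only
      omega
    · exact hM0
  simp only [tilt]
  rw [hheadlen, hlen]
  apply List.ext_getElem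
  · rw [List.length_map, List.length_range, gridOf_length, hX']
  · intro i hi1 hi2
    have hiN : i < (maxYof s + 1).toNat := by
      rw [List.length_map, List.length_range] at hi1; exact hi1
    rw [List.getElem_map, List.getElem_range]
    rw [gridOf_getElem _ i hi2]
    apply List.ext_getElem
    · rw [List.length_map, List.length_reverse, List.length_range,
          List.length_map, List.length_range, hY']
    · intro k hk1 hk2
      have hkM : k < (maxXof s + 1).toNat := by
        rw [List.length_map, List.length_reverse, List.length_range] at hk1; exact hk1
      rw [List.getElem_map, List.getElem_reverse, List.getElem_range,
          List.getElem_map, List.getElem_range]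
      rw [List.length_range]
      have hidx : (maxXof s + 1).toNat - 1 - k < (maxXof s + 1).toNat := by omega
      have elhs := gridOf_entry s ((maxXof s + 1).toNat - 1 - k) i hidx hiN
      rw [elhs]
      by_cases hc : (((((maxXof s + 1).toNat - 1 - k : Nat)) : Int), (i : Int)) ∈ s
      · rw [if_pos hc]
        have hmem := List.mem_map_of_mem hc (f := fun p => (p.2, maxXof s - p.1))
        simp only at hmem
        have heq : ((i : Int), maxXof s - ((((maxXof s + 1).toNat - 1 - k : Nat)) : Int))
            = ((i : Int), (k : Int)) := by
          rw [Prod.mk.injEq]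
          exact ⟨rfl, by omega⟩
        rw [heq] at hmem
        rw [if_pos hmem]
      · rw [if_neg hc, if_neg ?_]
        intro hmem
        apply hc
        obtain ⟨p, hp, he⟩ := List.mem_map.1 hmem
        rw [Prod.mk.injEq] at he
        have hpe : ((((((maxXof s + 1).toNat - 1 - k : Nat)) : Int), (i : Int))) = p := by
          rw [Prod.mk.injEq]
          exact ⟨by omega, by omega⟩
        rw [hpe]
        exact hp

theorem tilt_gridOf_stepB {s : List (Int × Int)} (hG : Good s) :
    tilt (gridOf s) = gridOf (normSet (s.map (fun p => (p.2, -p.1)))) := by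
  rw [tilt_gridOf hG]
  refine gridOf_congr fun q => ?_
  rw [List.mem_map, mem_stepB hG]
  constructor
  · rintro ⟨p, hp, rfl⟩; exact ⟨p, hp, rfl⟩
  · rintro ⟨p, hp, rfl⟩; exact ⟨p, hp, rfl⟩

-- ---- the 4-iteration loops agree ----
theorem loop_invariant (t : List (Int × Int)) (hGt : Good t) :
    ∀ (l : List Nat) (fa : Bool) (g : List (List Int)) (s : PySem.Set (Int × Int)),
    (fa = false → g = gridOf s ∧ Good s) →
    (l.foldl (fun (st : Bool × List (List Int)) _ =>
        if st.1 then st else if gridOf t == st.2 then (true, st.2) else (st.1, tilt st.2)) (fa, g)).1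
    = (l.foldl (fun (st : Bool × PySem.Set (Int × Int)) _ =>
        if st.1 then st else if PySem.Set.equal st.2 t then (true, st.2)
        else (st.1, normSet (st.2.map (fun p => (p.2, -p.1))))) (fa, s)).1 := by
  intro l
  induction l with
  | nil => intro fa g s _; rfl
  | cons hd tl ih =>
    intro fa g s hinv
    cases fa with
    | true =>
      simp only [List.foldl_cons]
      simp only [if_true]
      exact ih true g s (by simp)
    | false =>
      obtain ⟨hg, hGs⟩ := hinv rfl
      subst hg
      have hcond : ((gridOf t == gridOf s) : Bool) = PySem.Set.equal s t :=
        beq_grid_eq_equal hGs hGt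
      simp only [List.foldl_cons]
      simp only [Bool.false_eq_true, if_false]
      rw [hcond]
      cases hc : PySem.Set.equal s t with
      | true =>
        rw [if_pos rfl, if_pos rfl]
        exact ih true (gridOf s) s (by simp)
      | false =>
        rw [if_neg (by simp), if_neg (by simp)]
        exact ih false (tilt (gridOf s)) _ (fun _ => ⟨tilt_gridOf_stepB hGs, good_stepB hGs⟩)

-- ===== VERDICT (by name: the statement is the Claim_ definition above) =====
theorem is_fit_spec : Claim_equal_is_fit := by
  intro blank block _ hpre
  unfold Spec_is_fit
  by_cases hlen : blank.length = block.length
  · have hbne : blank ≠ [] := by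
      intro h; subst h
      exact hpre ⟨rfl, List.length_eq_zero_iff.1 hlen.symm⟩
    have hkne : block ≠ [] := by
      intro h; subst h
      exact hpre ⟨List.length_eq_zero_iff.1 hlen, rfl⟩
    simp only [is_fit, is_fit_alt, hlen, ne_eq, not_true_eq_false, if_false]
    rw [buildGrid_eq_gridOf hbne, buildGrid_eq_gridOf hkne]
    exact loop_invariant (normSet blank) (normSet_good hbne) _ false _ _
      (fun _ => ⟨rfl, normSet_good hkne⟩)
  · simp [is_fit, is_fit_alt, hlen]
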